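-- pv_equiv track=rewrite | github.com/arsamigullin/problem_solving_python | leet/amazon/strings_and_arrays/smallest_range_I.py | smallestRangeI
-- ===== SOURCE A (Python) =====
-- from typing import List
--
-- def smallestRangeI(A: List[int], K: int) -> int:
--     #Note: to have min and max values of array it is faster to do two separate min and max as opposed to sort!!!
--     #A.sort()
--     minA = min(A)
--     maxA = max(A)
--     if minA==maxA:
--         return 0
--     k1 = k2 = K
--
--     while minA+k1>maxA-k2:
--         k1-=1
--     return maxA-k2 - (minA+k1)
-- ===== SOURCE B (Python) =====
-- def smallestRangeI(A, K):
--     # one pass computes min and max; closed form max(0, (max-min) - 2K) replaces the decrement loop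
--     lo = hi = A[0]
--     for x in A[1:]:
--         if x < lo:
--             lo = x
--         elif x > hi:
--             hi = x
--     if lo == hi:
--         return 0
--     d = hi - lo - 2 * K
--     return d if d > 0 else 0
-- ===== Notes on version B (the rewrite author's own statement) =====
-- stated objective: alternative
-- what changed: Replaces A's decrement-until-fits while loop by the closed form max(0, (max-min) - 2K), with min and max computed in one explicit pass instead of two builtin scans.
-- outside the precondition, e.g. on smallestRangeI([], 0): A raises ValueError, B raises IndexError
import Mathlib
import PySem

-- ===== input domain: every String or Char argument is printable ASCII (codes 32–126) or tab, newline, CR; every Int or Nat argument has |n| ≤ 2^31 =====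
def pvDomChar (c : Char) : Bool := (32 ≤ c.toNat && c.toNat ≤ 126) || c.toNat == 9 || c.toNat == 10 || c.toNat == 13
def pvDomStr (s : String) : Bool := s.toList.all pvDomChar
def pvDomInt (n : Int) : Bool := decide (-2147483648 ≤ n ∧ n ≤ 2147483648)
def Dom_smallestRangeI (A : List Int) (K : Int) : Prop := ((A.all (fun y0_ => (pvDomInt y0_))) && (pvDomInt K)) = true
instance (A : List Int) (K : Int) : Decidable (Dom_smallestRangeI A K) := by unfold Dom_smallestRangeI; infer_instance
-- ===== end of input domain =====

-- B replaces A's decrement-until-fits while loop by the closed form max(0, (max-min)-2K), computing min and max in one explicit pass.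


-- ===== PORT A =====
-- the 'while minA+k1 > maxA-k2: k1 -= 1' loop, verbatim
def pvALoop (minA maxA k2 k1 : Int) : Int :=
  if minA + k1 > maxA - k2 then pvALoop minA maxA k2 (k1 - 1) else k1
termination_by (minA + k1 - (maxA - k2)).toNat
decreasing_by omega

def smallestRangeI (A : List Int) (K : Int) : Int :=
  match PySem.List.min? A (fun y => y), PySem.List.max? A (fun y => y) with
  | some minA, some maxA =>
    if minA == maxA then 0
    else
      let k2 := K
      let k1 := pvALoop minA maxA k2 K
      maxA - k2 - (minA + k1)
  | _, _ => 0   -- min()/max() of an empty list raises ValueError: excluded by Pre_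

-- ===== PORT B =====
def smallestRangeI_alt (A : List Int) (K : Int) : Int :=
  match A with
  | [] => 0    -- A[0] raises IndexError: excluded by Pre_
  | a :: rest =>
    let p := rest.foldl (fun (p : Int × Int) x =>
      if x < p.1 then (x, p.2) else if x > p.2 then (p.1, x) else p) (a, a)
    if p.1 == p.2 then 0
    else
      let d := p.2 - p.1 - 2 * K
      if d > 0 then d else 0

-- ===== PRECONDITION & SPEC =====
-- A raises ValueError on the empty list (min of empty sequence); B raises IndexError there.
def Pre_smallestRangeI (A : List Int) (K : Int) : Prop := A ≠ []
instance (A : List Int) (K : Int) : Decidable (Pre_smallestRangeI A K) := by unfold Pre_smallestRangeI; infer_instance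
def pvWitness_smallestRangeI : List Int × Int := ([1, 5, 3], 2)

def Spec_smallestRangeI (A : List Int) (K : Int) (out : Int) : Prop := out = smallestRangeI_alt A K
instance (A : List Int) (K : Int) (out : Int) : Decidable (Spec_smallestRangeI A K out) := by unfold Spec_smallestRangeI; infer_instance

-- ===== CLAIM (what is proved, stated in full; the proofs are below) =====
def Claim_equal_smallestRangeI : Prop := ∀ (A : List Int) (K : Int), Dom_smallestRangeI A K → Pre_smallestRangeI A K → Spec_smallestRangeI A K (smallestRangeI A K)

-- ===== LEMMAS AND PROOFS =====

-- A's while loop in closed form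
theorem pvALoop_eq (minA maxA k2 : Int) (k1 : Int) :
    pvALoop minA maxA k2 k1 = if minA + k1 ≤ maxA - k2 then k1 else maxA - k2 - minA := by
  fun_induction pvALoop minA maxA k2 k1 with
  | case1 k1 h ih => rw [ih]; split <;> split <;> omega
  | case2 k1 h => simp; omega

theorem pvFoldMin_le (t : List Int) (lo : Int) : t.foldl min lo ≤ lo := by
  induction t generalizing lo with
  | nil => simp
  | cons x t ih => exact le_trans (ih (min lo x)) (by omega)

theorem pvLe_foldMax (t : List Int) (hi : Int) : hi ≤ t.foldl max hi := by
  induction t generalizing hi with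
  | nil => simp
  | cons x t ih => exact le_trans (by omega) (ih (max hi x))

-- B's fold computes running min and max
theorem pvFold_minmax (rest : List Int) (lo hi : Int) (hle : lo ≤ hi) :
    rest.foldl (fun (p : Int × Int) x =>
      if x < p.1 then (x, p.2) else if x > p.2 then (p.1, x) else p) (lo, hi)
      = (rest.foldl min lo, rest.foldl max hi) := by
  induction rest generalizing lo hi with
  | nil => rfl
  | cons x t ih =>
    simp only [List.foldl_cons]
    by_cases h1 : x < lo
    · rw [if_pos h1, show min lo x = x by omega, show max hi x = hi by omega,
          ih x hi (by omega)]
    · rw [if_neg h1]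
      by_cases h2 : x > hi
      · rw [if_pos h2, show min lo x = lo by omega, show max hi x = x by omega,
            ih lo x (by omega)]
      · rw [if_neg h2, show min lo x = lo by omega, show max hi x = hi by omega,
            ih lo hi hle]

-- ===== VERDICT (by name: the statement is the Claim_ definition above) =====
theorem smallestRangeI_spec : Claim_equal_smallestRangeI := by
  intro A K _ hpre
  unfold Spec_smallestRangeI
  match A with
  | [] => exact absurd rfl hpre
  | a :: rest =>
    have hm : rest.foldl min a ≤ rest.foldl max a :=
      le_trans (pvFoldMin_le rest a) (pvLe_foldMax rest a)
    simp only [smallestRangeI, smallestRangeI_alt, PySem.List.min?_id_cons,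
      PySem.List.max?_id_cons, pvFold_minmax rest a a le_rfl, pvALoop_eq, beq_iff_eq]
    split_ifs <;> omega
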